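-- pv_equiv track=rewrite | github.com/Timehsw/Python-AI | FeatureEngineering/woe_iv.py | candidate_index
-- ===== SOURCE A (Python) =====
-- def candidate_index(woe_diff_flag):
--     index = [i for i in range(len(woe_diff_flag))]
--     if len(woe_diff_flag) > 2:
--         for i in range(1, len(woe_diff_flag) - 1):
--             if woe_diff_flag[i] == woe_diff_flag[i - 1] and woe_diff_flag[i] == woe_diff_flag[i + 1]:
--                 if i in index:
--                     index.remove(i)
--     return index
-- ===== SOURCE B (Python) =====
-- def candidate_index(woe_diff_flag):
--     n = len(woe_diff_flag)
--     return [i for i in range(n)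
--             if i == 0 or i == n - 1
--             or woe_diff_flag[i] != woe_diff_flag[i - 1]
--             or woe_diff_flag[i] != woe_diff_flag[i + 1]]
-- ===== Notes on version B (the rewrite author's own statement) =====
-- stated objective: simpler
-- what changed: Replaces the build-full-index-then-conditional 'i in index'/'index.remove(i)' mutation loop with a single list comprehension keeping an index exactly when it is a boundary or differs from a neighbor.
import Mathlib
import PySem

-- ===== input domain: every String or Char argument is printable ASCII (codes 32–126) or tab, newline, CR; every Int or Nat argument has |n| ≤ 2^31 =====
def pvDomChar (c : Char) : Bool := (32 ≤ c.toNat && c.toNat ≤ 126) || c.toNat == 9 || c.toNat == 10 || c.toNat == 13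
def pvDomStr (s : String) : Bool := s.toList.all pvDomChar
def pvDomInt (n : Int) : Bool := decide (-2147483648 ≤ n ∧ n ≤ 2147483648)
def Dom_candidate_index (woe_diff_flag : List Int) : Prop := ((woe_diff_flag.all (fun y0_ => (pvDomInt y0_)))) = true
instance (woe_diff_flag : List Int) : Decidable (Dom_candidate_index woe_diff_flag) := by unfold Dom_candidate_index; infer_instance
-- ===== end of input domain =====

-- B replaces A's build-then-conditionally-remove mutation loop with a single filtering pass (simpler, one traversal).

-- ===== PORT A =====
-- literal transliteration: index = list(range(n)); for i in range(1, n-1): if triple-equal and i in index: index.remove(i)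
-- (all list indices i-1, i, i+1 are provably in range inside the loop, so pyGet? never returns none; Option equality is exact there)
def candidate_index (woe_diff_flag : List Int) : List Int :=
  let index := PySem.List.pyRange 0 (woe_diff_flag.length : Int) 1
  if (woe_diff_flag.length : Int) > 2 then
    (PySem.List.pyRange 1 ((woe_diff_flag.length : Int) - 1) 1).foldl
      (fun index i =>
        if PySem.List.pyGet? woe_diff_flag i = PySem.List.pyGet? woe_diff_flag (i - 1) ∧
           PySem.List.pyGet? woe_diff_flag i = PySem.List.pyGet? woe_diff_flag (i + 1) then
          if i ∈ index then (PySem.List.remove? index i).getD index else index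
        else index)
      index
  else index

-- ===== PORT B =====
-- literal transliteration of Source B: one list comprehension with a keep-condition
def candidate_index_alt (woe_diff_flag : List Int) : List Int :=
  let n : Int := woe_diff_flag.length
  (PySem.List.pyRange 0 n 1).filter (fun i =>
    decide (i = 0) || decide (i = n - 1) ||
    !(PySem.List.pyGet? woe_diff_flag i == PySem.List.pyGet? woe_diff_flag (i - 1)) ||
    !(PySem.List.pyGet? woe_diff_flag i == PySem.List.pyGet? woe_diff_flag (i + 1)))

-- ===== PRECONDITION & SPEC =====
def Spec_candidate_index (woe_diff_flag : List Int) (out : List Int) : Prop := out = candidate_index_alt woe_diff_flag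
instance (woe_diff_flag : List Int) (out : List Int) : Decidable (Spec_candidate_index woe_diff_flag out) := by unfold Spec_candidate_index; infer_instance

-- ===== CLAIM (what is proved, stated in full; the proofs are below) =====
def Claim_equal_candidate_index : Prop := ∀ (woe_diff_flag : List Int), Dom_candidate_index woe_diff_flag → Spec_candidate_index woe_diff_flag (candidate_index woe_diff_flag)

-- ===== LEMMAS AND PROOFS =====

-- the Boolean "interior triple-equal" test, for the proofs
def pvBad (w : List Int) (i : Int) : Bool :=
  (PySem.List.pyGet? w i == PySem.List.pyGet? w (i - 1)) &&
  (PySem.List.pyGet? w i == PySem.List.pyGet? w (i + 1))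

-- one loop step of A, seen as a filter on a duplicate-free state
lemma pvStep_eq_filter (w : List Int) (i : Int) (l : List Int) (hl : l.Nodup) :
    (if PySem.List.pyGet? w i = PySem.List.pyGet? w (i - 1) ∧
        PySem.List.pyGet? w i = PySem.List.pyGet? w (i + 1) then
       if i ∈ l then (PySem.List.remove? l i).getD l else l
     else l)
    = l.filter (fun j => !(pvBad w i && j == i)) := by
  by_cases hb : PySem.List.pyGet? w i = PySem.List.pyGet? w (i - 1) ∧
      PySem.List.pyGet? w i = PySem.List.pyGet? w (i + 1)
  · simp only [if_pos hb]
    have hbad : pvBad w i = true := by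
      simp only [pvBad, Bool.and_eq_true, beq_iff_eq]; exact hb
    by_cases hm : i ∈ l
    · rw [if_pos hm, PySem.List.remove?_eq_some_erase _ _ hm, Option.getD_some,
        List.Nodup.erase_eq_filter hl]
      apply List.filter_congr
      intro j _
      simp [hbad, bne]
    · rw [if_neg hm]
      symm
      apply List.filter_eq_self.2
      intro j hj
      have : j ≠ i := fun h => hm (h ▸ hj)
      simp [this]
  · simp only [if_neg hb]
    have hbad : pvBad w i = false := by
      simp only [pvBad, Bool.and_eq_false_iff]
      rcases not_and_or.mp hb with h | h
      · left; simpa using h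
      · right; simpa using h
    symm
    apply List.filter_eq_self.2
    intro j _
    simp [hbad]

-- A's whole loop over s, started on a duplicate-free l, is a single filter
lemma pvFold_eq_filter (w : List Int) :
    ∀ (s l : List Int), l.Nodup →
      s.foldl
        (fun index i =>
          if PySem.List.pyGet? w i = PySem.List.pyGet? w (i - 1) ∧
             PySem.List.pyGet? w i = PySem.List.pyGet? w (i + 1) then
            if i ∈ index then (PySem.List.remove? index i).getD index else index
          else index)
        l
      = l.filter (fun j => !(s.contains j && pvBad w j)) := by
  intro s
  induction s with
  | nil => intro l _; simp
  | cons i s ih =>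
    intro l hl
    rw [List.foldl_cons, pvStep_eq_filter w i l hl,
      ih _ (hl.filter _), List.filter_filter]
    apply List.filter_congr
    intro j _
    by_cases hj : j = i
    · subst hj; simp; tauto
    · simp [hj]

-- ===== VERDICT (by name: the statement is the Claim_ definition above) =====

theorem candidate_index_spec : Claim_equal_candidate_index := by
  intro w _
  unfold Spec_candidate_index candidate_index candidate_index_alt
  have hA : (if (w.length : Int) > 2 then
      (PySem.List.pyRange 1 ((w.length : Int) - 1) 1).foldl
        (fun index i =>
          if PySem.List.pyGet? w i = PySem.List.pyGet? w (i - 1) ∧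
             PySem.List.pyGet? w i = PySem.List.pyGet? w (i + 1) then
            if i ∈ index then (PySem.List.remove? index i).getD index else index
          else index)
        (PySem.List.pyRange 0 (w.length : Int) 1)
    else PySem.List.pyRange 0 (w.length : Int) 1)
      = (PySem.List.pyRange 0 (w.length : Int) 1).filter
          (fun j => !((PySem.List.pyRange 1 ((w.length : Int) - 1) 1).contains j && pvBad w j)) := by
    by_cases hn : (w.length : Int) > 2
    · rw [if_pos hn, pvFold_eq_filter w _ _ (PySem.List.nodup_pyRange_one _ _)]
    · rw [if_neg hn]
      have hnil : PySem.List.pyRange 1 ((w.length : Int) - 1) 1 = [] :=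
        PySem.List.pyRange_one_eq_nil (by omega)
      rw [hnil]
      symm
      apply List.filter_eq_self.2
      intro j _
      simp
  simp only [hA]
  apply List.filter_congr
  intro j hj
  rw [PySem.List.mem_pyRange_one] at hj
  have hc : (PySem.List.pyRange 1 ((w.length : Int) - 1) 1).contains j
      = decide (1 ≤ j ∧ j < (w.length : Int) - 1) := by
    rw [Bool.eq_iff_iff]
    simp [PySem.List.mem_pyRange_one]
  rw [hc]
  by_cases h1 : j = 0
  · subst h1; simp
  · by_cases h2 : j = (w.length : Int) - 1
    · simp [h2]
    · have : 1 ≤ j ∧ j < (w.length : Int) - 1 := by omega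
      simp [this, h1, h2, pvBad, Bool.not_and]
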